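-- pv_equiv track=rewrite | github.com/bsy3719/property-repro-platform | src/agents/comparison_report/summary.py | _build_headline
-- ===== SOURCE A (Python) =====
-- from typing import Any
--
-- def _build_headline(metric_rows: list[dict[str, Any]], execution_spec: dict[str, Any]) -> tuple[str, str]:
--     if execution_spec.get("status") != "success":
--         return "실행이 완료되지 않아 재현값을 안정적으로 비교할 수 없습니다.", "failed"
--
--     comparable_rows = [row for row in metric_rows if row.get("relative_error_pct") is not None]
--     if not comparable_rows:
--         return "재현 코드는 실행되었지만 논문 보고값과 직접 비교할 수 있는 지표가 충분하지 않습니다.", "limited"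
--
--     good_count = sum(1 for row in comparable_rows if row["severity"] == "good")
--     acceptable_count = sum(1 for row in comparable_rows if row["severity"] == "acceptable")
--
--     if good_count == len(comparable_rows):
--         return "전반적으로 성공적인 재현으로 평가됩니다.", "good"
--     if good_count + acceptable_count == len(comparable_rows):
--         return "전반적으로 양호한 재현이지만 일부 지표에서 눈에 띄는 편차가 있습니다.", "partial"
--     return "재현은 일부 성과가 있지만 논문 보고값과의 차이가 비교적 큽니다.", "poor"
-- ===== SOURCE B (Python) =====
-- def _build_headline(metric_rows, execution_spec):
--     if execution_spec.get("status") != "success":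
--         return "실행이 완료되지 않아 재현값을 안정적으로 비교할 수 없습니다.", "failed"
--
--     worst = None
--     for row in metric_rows:
--         if row.get("relative_error_pct") is None:
--             continue
--         severity = row["severity"]
--         rank = 0 if severity == "good" else 1 if severity == "acceptable" else 2
--         if worst is None or rank > worst:
--             worst = rank
--
--     if worst is None:
--         return "재현 코드는 실행되었지만 논문 보고값과 직접 비교할 수 있는 지표가 충분하지 않습니다.", "limited"
--     if worst == 0:
--         return "전반적으로 성공적인 재현으로 평가됩니다.", "good"
--     if worst == 1:
--         return "전반적으로 양호한 재현이지만 일부 지표에서 눈에 띄는 편차가 있습니다.", "partial"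
--     return "재현은 일부 성과가 있지만 논문 보고값과의 차이가 비교적 큽니다.", "poor"
-- ===== Notes on version B (the rewrite author's own statement) =====
-- stated objective: alternative
-- what changed: Replaces the intermediate comparable_rows list plus two counting passes and length comparisons with a single pass over metric_rows that maintains the worst severity rank (good=0, acceptable=1, other=2) and classifies by that maximum.
import Mathlib
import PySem

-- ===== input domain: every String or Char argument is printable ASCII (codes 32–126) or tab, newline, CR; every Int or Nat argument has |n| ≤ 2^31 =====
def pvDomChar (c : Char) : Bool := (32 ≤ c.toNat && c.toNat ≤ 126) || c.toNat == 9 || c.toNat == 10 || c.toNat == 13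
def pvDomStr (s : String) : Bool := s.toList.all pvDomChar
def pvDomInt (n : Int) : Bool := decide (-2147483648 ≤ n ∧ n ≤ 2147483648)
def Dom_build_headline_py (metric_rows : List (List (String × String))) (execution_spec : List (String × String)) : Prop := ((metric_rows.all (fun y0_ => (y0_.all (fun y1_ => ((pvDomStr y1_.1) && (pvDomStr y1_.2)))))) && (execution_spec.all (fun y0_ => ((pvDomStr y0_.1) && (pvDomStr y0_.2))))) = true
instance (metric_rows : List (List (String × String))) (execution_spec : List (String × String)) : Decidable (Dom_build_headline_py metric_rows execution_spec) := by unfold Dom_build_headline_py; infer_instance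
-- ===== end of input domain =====

-- B replaces A's intermediate filtered list and two counting passes with a single pass
-- maintaining the worst severity rank (good=0, acceptable=1, other=2) (objective: alternative).

-- dict.get(k): first-match lookup in the insertion-ordered association list
def pyDictGet (d : List (String × String)) (k : String) : Option String :=
  (d.find? (fun kv => kv.1 == k)).map (·.2)

-- ===== PORT A =====
-- row["severity"] raises KeyError when the key is missing; Pre_ excludes that, so the
-- total form `.getD ""` is only taken on excluded inputs.
def build_headline_py (metric_rows : List (List (String × String))) (execution_spec : List (String × String)) : String × String :=
  if ¬ (pyDictGet execution_spec "status" = some "success") then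
    ("실행이 완료되지 않아 재현값을 안정적으로 비교할 수 없습니다.", "failed")
  else
    let comparable_rows := metric_rows.filter (fun row => (pyDictGet row "relative_error_pct").isSome)
    if comparable_rows.isEmpty then
      ("재현 코드는 실행되었지만 논문 보고값과 직접 비교할 수 있는 지표가 충분하지 않습니다.", "limited")
    else
      let good_count := comparable_rows.foldl (fun acc row => if (pyDictGet row "severity").getD "" = "good" then acc + 1 else acc) 0
      let acceptable_count := comparable_rows.foldl (fun acc row => if (pyDictGet row "severity").getD "" = "acceptable" then acc + 1 else acc) 0
      if good_count = comparable_rows.length then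
        ("전반적으로 성공적인 재현으로 평가됩니다.", "good")
      else if good_count + acceptable_count = comparable_rows.length then
        ("전반적으로 양호한 재현이지만 일부 지표에서 눈에 띄는 편차가 있습니다.", "partial")
      else
        ("재현은 일부 성과가 있지만 논문 보고값과의 차이가 비교적 큽니다.", "poor")

-- ===== PORT B =====
-- rank = 0 if severity == "good" else 1 if severity == "acceptable" else 2
def pvSevRank (s : String) : Nat :=
  if s = "good" then 0 else if s = "acceptable" then 1 else 2

-- one iteration of B's loop: skip non-comparable rows, keep the worst (max) rank seen
def pvWorstStep (worst : Option Nat) (row : List (String × String)) : Option Nat :=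
  if (pyDictGet row "relative_error_pct").isSome then
    let rank := pvSevRank ((pyDictGet row "severity").getD "")
    if worst = none ∨ rank > worst.getD 0 then some rank else worst
  else worst

def build_headline_py_alt (metric_rows : List (List (String × String))) (execution_spec : List (String × String)) : String × String :=
  if ¬ (pyDictGet execution_spec "status" = some "success") then
    ("실행이 완료되지 않아 재현값을 안정적으로 비교할 수 없습니다.", "failed")
  else
    match metric_rows.foldl pvWorstStep none with
    | none => ("재현 코드는 실행되었지만 논문 보고값과 직접 비교할 수 있는 지표가 충분하지 않습니다.", "limited")
    | some 0 => ("전반적으로 성공적인 재현으로 평가됩니다.", "good")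
    | some 1 => ("전반적으로 양호한 재현이지만 일부 지표에서 눈에 띄는 편차가 있습니다.", "partial")
    | some _ => ("재현은 일부 성과가 있지만 논문 보고값과의 차이가 비교적 큽니다.", "poor")

-- ===== PRECONDITION & SPEC =====
-- Pre_ excludes exactly the inputs on which Python A raises KeyError (a comparable row,
-- reached with status == "success", that lacks the "severity" key); Python B raises there too.
def Pre_build_headline_py (metric_rows : List (List (String × String))) (execution_spec : List (String × String)) : Prop :=
  pyDictGet execution_spec "status" = some "success" →
    ∀ row ∈ metric_rows, (pyDictGet row "relative_error_pct").isSome → (pyDictGet row "severity").isSome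

instance (metric_rows : List (List (String × String))) (execution_spec : List (String × String)) : Decidable (Pre_build_headline_py metric_rows execution_spec) := by
  unfold Pre_build_headline_py; infer_instance

def pvWitness_build_headline_py : (List (List (String × String))) × (List (String × String)) :=
  ([[("relative_error_pct", "1.0"), ("severity", "good")]], [("status", "success")])

def Spec_build_headline_py (metric_rows : List (List (String × String))) (execution_spec : List (String × String)) (out : String × String) : Prop := out = build_headline_py_alt metric_rows execution_spec
instance (metric_rows : List (List (String × String))) (execution_spec : List (String × String)) (out : String × String) : Decidable (Spec_build_headline_py metric_rows execution_spec out) := by unfold Spec_build_headline_py; infer_instance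

-- ===== CLAIM (what is proved, stated in full; the proofs are below) =====
def Claim_equal_build_headline_py : Prop := ∀ (metric_rows : List (List (String × String))) (execution_spec : List (String × String)), Dom_build_headline_py metric_rows execution_spec → Pre_build_headline_py metric_rows execution_spec → Spec_build_headline_py metric_rows execution_spec (build_headline_py metric_rows execution_spec)

-- ===== LEMMAS AND PROOFS =====

-- B's skipping step over the whole list = an unconditional max step over the filtered list
theorem foldl_worstStep_filter (mr : List (List (String × String))) (acc : Option Nat) :
    mr.foldl pvWorstStep acc =
      (mr.filter (fun row => (pyDictGet row "relative_error_pct").isSome)).foldl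
        (fun w row =>
          let rank := pvSevRank ((pyDictGet row "severity").getD "")
          if w = none ∨ rank > w.getD 0 then some rank else w) acc := by
  induction mr generalizing acc with
  | nil => rfl
  | cons r t ih =>
    by_cases h : (pyDictGet r "relative_error_pct").isSome <;>
      simp [pvWorstStep, h, ih]

-- once the accumulator is `some w`, the step keeps a running maximum
theorem foldl_worstStep_some (c : List (List (String × String))) (w : Nat) :
    c.foldl (fun w row =>
        let rank := pvSevRank ((pyDictGet row "severity").getD "")
        if w = none ∨ rank > w.getD 0 then some rank else w) (some w) =
      some (c.foldl (fun a row => max a (pvSevRank ((pyDictGet row "severity").getD ""))) w) := by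
  induction c generalizing w with
  | nil => rfl
  | cons r t ih =>
    by_cases h : pvSevRank ((pyDictGet r "severity").getD "") > w
    · simp [h, ih, Nat.max_eq_right (Nat.le_of_lt h)]
    · simp [h, ih, Nat.max_eq_left (Nat.not_lt.mp h)]

-- on a nonempty list the fold produces `some` of the running maximum of ranks
theorem foldl_worstStep_cons (r0 : List (String × String)) (rest : List (List (String × String))) :
    (r0 :: rest).foldl (fun w row =>
        let rank := pvSevRank ((pyDictGet row "severity").getD "")
        if w = none ∨ rank > w.getD 0 then some rank else w) none =
      some (rest.foldl (fun a row => max a (pvSevRank ((pyDictGet row "severity").getD "")))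
        (pvSevRank ((pyDictGet r0 "severity").getD ""))) := by
  rw [List.foldl_cons]
  simp only [true_or, if_pos, Option.getD_none]
  exact foldl_worstStep_some rest _

-- bound characterisation of the running maximum
theorem foldl_max_le_iff {α : Type} (f : α → Nat) (l : List α) (a n : Nat) :
    l.foldl (fun b x => max b (f x)) a ≤ n ↔ a ≤ n ∧ ∀ x ∈ l, f x ≤ n := by
  induction l generalizing a with
  | nil => simp
  | cons x t ih =>
    simp only [List.foldl_cons, ih, List.mem_cons, Nat.max_le]
    constructor
    · rintro ⟨⟨h1, h2⟩, h3⟩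
      exact ⟨h1, fun y hy => hy.elim (fun e => e ▸ h2) (h3 y)⟩
    · rintro ⟨h1, h2⟩
      exact ⟨⟨h1, h2 x (Or.inl rfl)⟩, fun y hy => h2 y (Or.inr hy)⟩

-- A's counting loop is a countP
theorem foldl_count_eq_countP {α : Type} (p : α → Prop) [DecidablePred p] (l : List α) (n : Nat) :
    l.foldl (fun acc x => if p x then acc + 1 else acc) n = n + l.countP (fun x => decide (p x)) := by
  induction l generalizing n with
  | nil => simp
  | cons a t ih =>
    by_cases h : p a <;> simp [h, ih]; omega

-- A's first branch test ↔ every comparable row has rank 0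
theorem count_good_iff (c : List (List (String × String))) :
    c.foldl (fun acc row => if (pyDictGet row "severity").getD "" = "good" then acc + 1 else acc) 0 = c.length ↔
      ∀ row ∈ c, pvSevRank ((pyDictGet row "severity").getD "") = 0 := by
  rw [foldl_count_eq_countP, Nat.zero_add, List.countP_eq_length]
  constructor
  · intro h row hr
    simp [pvSevRank, of_decide_eq_true (h row hr)]
  · intro h row hr
    have := h row hr
    simp only [pvSevRank] at this
    split_ifs at this with h1 h2 <;> simp_all

-- A's second branch test ↔ every comparable row has rank ≤ 1
theorem count_sum_iff (c : List (List (String × String))) :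
    c.foldl (fun acc row => if (pyDictGet row "severity").getD "" = "good" then acc + 1 else acc) 0 +
      c.foldl (fun acc row => if (pyDictGet row "severity").getD "" = "acceptable" then acc + 1 else acc) 0 = c.length ↔
      ∀ row ∈ c, pvSevRank ((pyDictGet row "severity").getD "") ≤ 1 := by
  rw [foldl_count_eq_countP, foldl_count_eq_countP, Nat.zero_add, Nat.zero_add]
  have hsum : c.countP (fun x => decide ((pyDictGet x "severity").getD "" = "good")) +
      c.countP (fun x => decide ((pyDictGet x "severity").getD "" = "acceptable")) =
      c.countP (fun x => decide ((pyDictGet x "severity").getD "" = "good") ||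
        decide ((pyDictGet x "severity").getD "" = "acceptable")) := by
    induction c with
    | nil => rfl
    | cons a t ih =>
      by_cases h1 : (pyDictGet a "severity").getD "" = "good" <;>
        by_cases h2 : (pyDictGet a "severity").getD "" = "acceptable" <;>
        simp_all <;> omega
  rw [hsum, List.countP_eq_length]
  constructor
  · intro h row hr
    rcases Bool.or_eq_true_iff.mp (h row hr) with h' | h' <;>
      simp [pvSevRank, of_decide_eq_true h']
  · intro h row hr
    have := h row hr
    simp only [pvSevRank] at this
    split_ifs at this with h1 h2 <;> simp_all

-- ===== VERDICT (by name: the statement is the Claim_ definition above) =====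
theorem build_headline_py_spec : Claim_equal_build_headline_py := by
  intro mr es _ _
  unfold Spec_build_headline_py build_headline_py build_headline_py_alt
  by_cases hs : pyDictGet es "status" = some "success"
  · simp only [hs, not_true_eq_false, if_false]
    rw [foldl_worstStep_filter]
    set c := mr.filter (fun row => (pyDictGet row "relative_error_pct").isSome) with hc
    match hce : c with
    | [] => simp
    | r0 :: rest =>
      rw [show (r0 :: rest).isEmpty = false from rfl, foldl_worstStep_cons]
      simp only [Bool.false_eq_true, if_false]
      set w := rest.foldl (fun a row => max a (pvSevRank ((pyDictGet row "severity").getD ""))) (pvSevRank ((pyDictGet r0 "severity").getD "")) with hw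
      have hw_le : ∀ n, w ≤ n ↔ ∀ row ∈ r0 :: rest, pvSevRank ((pyDictGet row "severity").getD "") ≤ n := by
        intro n
        rw [hw, foldl_max_le_iff]
        simp
      by_cases b1 : (r0 :: rest).foldl (fun acc row => if (pyDictGet row "severity").getD "" = "good" then acc + 1 else acc) 0 = (r0 :: rest).length
      · have hall := (count_good_iff _).mp b1
        have hw0 : w = 0 := Nat.le_zero.mp ((hw_le 0).mpr (fun row hr => Nat.le_of_eq (hall row hr)))
        rw [if_pos b1, hw0]
      · have hw0 : w ≠ 0 := by
          intro h0
          exact b1 ((count_good_iff _).mpr (fun row hr =>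
            Nat.le_zero.mp (((hw_le 0).mp (Nat.le_of_eq h0)) row hr)))
        by_cases b2 : (r0 :: rest).foldl (fun acc row => if (pyDictGet row "severity").getD "" = "good" then acc + 1 else acc) 0 + (r0 :: rest).foldl (fun acc row => if (pyDictGet row "severity").getD "" = "acceptable" then acc + 1 else acc) 0 = (r0 :: rest).length
        · have hw1 : w = 1 := by
            have := (hw_le 1).mpr ((count_sum_iff _).mp b2)
            omega
          rw [if_neg b1, if_pos b2, hw1]
        · have hw2 : ¬ w ≤ 1 := fun h => b2 ((count_sum_iff _).mpr ((hw_le 1).mp h))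
          have : ∃ k, w = k + 2 := ⟨w - 2, by omega⟩
          rcases this with ⟨k, hk⟩
          rw [if_neg b1, if_neg b2, hk]
          rfl
  · simp [hs]
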